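-- pv_equiv track=rewrite | github.com/FC1104-XX/PDS---HW-1 | yahtzee.py | has_straight
-- ===== SOURCE A (Python) =====
-- def has_straight(dice, length):
--     """Checks if there is a straight of k length in a given dice roll"""
--     ordered_dice = sorted(set(dice)) #we convert dice to a set and then an ordered list because 1) it is an ordered data structure, easier to find a sequence 2) duplicates are of no importance in straights
--
--     if len(dice)<length: #straights of k=length can only exist if the amount of non duplicate numbers is >= k
--         return False
--
--     longest_seq=1
--
--     for i in range(1, len(ordered_dice)):
--         if ordered_dice[i] == ordered_dice[i-1] + 1:
--             longest_seq += 1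
--             if longest_seq == length:
--                 return True
--         else:
--             longest_seq = 1
--     return False
-- ===== SOURCE B (Python) =====
-- def has_straight(dice, length):
--     """Checks if there is a straight of k length in a given dice roll"""
--     s = set(dice)
--     for n in s:
--         if n - 1 in s:
--             continue  # not the start of a run; this run is expanded from its minimum only
--         cur = 1
--         while n + cur in s:
--             cur += 1
--             if cur == length:
--                 return True
--     return False
-- ===== Notes on version B (the rewrite author's own statement) =====
-- stated objective: alternative
-- what changed: A sorts the deduplicated dice and scans adjacent pairs counting the longest run; B never sorts: it expands each consecutive run of set(dice) exactly once, starting only from values n with n-1 not in the set, walking upward with membership tests and returning as soon as the run length hits the target.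
import Mathlib
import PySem

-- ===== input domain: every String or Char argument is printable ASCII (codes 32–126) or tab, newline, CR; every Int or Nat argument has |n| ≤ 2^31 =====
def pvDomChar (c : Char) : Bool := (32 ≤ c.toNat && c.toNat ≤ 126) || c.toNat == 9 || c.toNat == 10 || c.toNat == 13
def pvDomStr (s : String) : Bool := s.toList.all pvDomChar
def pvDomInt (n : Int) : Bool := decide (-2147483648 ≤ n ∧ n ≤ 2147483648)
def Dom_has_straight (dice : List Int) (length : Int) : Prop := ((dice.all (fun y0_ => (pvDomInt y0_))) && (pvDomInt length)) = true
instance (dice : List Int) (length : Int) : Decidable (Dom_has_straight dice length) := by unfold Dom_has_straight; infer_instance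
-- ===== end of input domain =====

-- B replaces A's sort-then-scan over sorted(set(dice)) by expanding each consecutive run of set(dice)
-- exactly once from its minimum (n with n-1 not in the set); objective: alternative algorithm, same result.

-- ===== PORT A =====
-- A's for-loop over i in range(1, len(ordered_dice)), carrying (previous element, longest_seq).
def hsLoopA (length : Int) : List Int → Int → Int → Bool
  | [], _, _ => false
  | x :: rest, prev, longest =>
      if x = prev + 1 then
        if longest + 1 = length then true
        else hsLoopA length rest x (longest + 1)
      else hsLoopA length rest x 1

def has_straight (dice : List Int) (length : Int) : Bool :=
  let ordered_dice := PySem.List.sorted (PySem.Set.ofList dice) (fun x => x) false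
  if (dice.length : Int) < length then false
  else
    match ordered_dice with
    | [] => false
    | h :: t => hsLoopA length t h 1

-- ===== PORT B =====
-- B's while-loop 'while n + cur in s: cur += 1; if cur == length: return True', fueled by |s|
-- (a run contains at most |s| distinct values, so the fuel never runs out; proved below).
def hsExpand (s : List Int) (n length : Int) : Int → Nat → Bool
  | _, 0 => false
  | cur, fuel + 1 =>
      if (n + cur) ∈ s then
        if cur + 1 = length then true
        else hsExpand s n length (cur + 1) fuel
      else false

def has_straight_alt (dice : List Int) (length : Int) : Bool :=
  let s := PySem.Set.ofList dice
  s.any (fun n => if (n - 1) ∈ s then false else hsExpand s n length 1 s.length)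

-- ===== PRECONDITION & SPEC =====
def Spec_has_straight (dice : List Int) (length : Int) (out : Bool) : Prop := out = has_straight_alt dice length
instance (dice : List Int) (length : Int) (out : Bool) : Decidable (Spec_has_straight dice length out) := by unfold Spec_has_straight; infer_instance

-- ===== CLAIM (what is proved, stated in full; the proofs are below) =====
def Claim_equal_has_straight : Prop := ∀ (dice : List Int) (length : Int), Dom_has_straight dice length → Spec_has_straight dice length (has_straight dice length)

-- ===== LEMMAS AND PROOFS =====

-- Both programs detect: length ≥ 2 and some run of `length` consecutive values all present in dice.
def StraightIn (l : List Int) (length : Int) : Prop :=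
  2 ≤ length ∧ ∃ n : Int, ∀ k : Int, 0 ≤ k → k < length → n + k ∈ l

-- [a, a+1, ..., a+m-1]
def chainL (a : Int) : Nat → List Int
  | 0 => []
  | m + 1 => a :: chainL (a + 1) m

lemma chainL_prefix_mono : ∀ (m' m : Nat) (a : Int), m' ≤ m → chainL a m' <+: chainL a m := by
  intro m'
  induction m' with
  | zero => intro m a _; exact List.nil_prefix
  | succ m' ih =>
    intro m a h
    obtain ⟨m'', rfl⟩ : ∃ m'', m = m'' + 1 := ⟨m - 1, by omega⟩
    rw [chainL, chainL]
    exact List.cons_prefix_cons.mpr ⟨rfl, ih m'' (a + 1) (by omega)⟩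

-- N distinct values all in l force N ≤ l.length
lemma card_le_of_inj (l : List Int) (f : ℕ → Int) (hf : Function.Injective f) (N : ℕ)
    (h : ∀ j < N, f j ∈ l) : N ≤ l.length := by
  have hsub : (Finset.range N).image f ⊆ l.toFinset := by
    intro x hx
    simp only [Finset.mem_image, Finset.mem_range] at hx
    obtain ⟨j, hj, rfl⟩ := hx
    exact List.mem_toFinset.mpr (h j hj)
  have hc := Finset.card_le_card hsub
  rw [Finset.card_image_of_injective _ hf, Finset.card_range] at hc
  exact hc.trans l.toFinset_card_le

-- A-loop soundness
lemma loopA_sound (L : List Int) (length : Int) :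
    ∀ (t : List Int) (prev longest : Int), 1 ≤ longest →
    (∀ j : Int, 0 ≤ j → j < longest → prev - j ∈ L) →
    (∀ x ∈ t, x ∈ L) →
    hsLoopA length t prev longest = true → StraightIn L length := by
  intro t
  induction t with
  | nil => intro prev longest _ _ _ h; simp [hsLoopA] at h
  | cons x rest ih =>
    intro prev longest h1 hdown hmem hrun
    simp only [hsLoopA] at hrun
    by_cases hx : x = prev + 1
    · rw [if_pos hx] at hrun
      by_cases hl : longest + 1 = length
      · refine ⟨by omega, x - (length - 1), ?_⟩
        intro k hk0 hkl
        have hxL : x ∈ L := hmem x (by simp)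
        by_cases hke : k = length - 1
        · subst hke
          have : x - (length - 1) + (length - 1) = x := by ring
          rw [this]; exact hxL
        · have : x - (length - 1) + k = prev - (length - 2 - k) := by omega
          rw [this]
          exact hdown _ (by omega) (by omega)
      · rw [if_neg hl] at hrun
        refine ih x (longest + 1) (by omega) ?_ (fun y hy => hmem y (by simp [hy])) hrun
        intro j hj0 hjl
        by_cases hj : j = 0
        · subst hj; simpa using hmem x (by simp)
        · have : x - j = prev - (j - 1) := by omega
          rw [this]; exact hdown _ (by omega) (by omega)
    · rw [if_neg hx] at hrun
      refine ih x 1 le_rfl ?_ (fun y hy => hmem y (by simp [hy])) hrun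
      intro j hj0 hjl
      have hj : j = 0 := by omega
      subst hj; simpa using hmem x (by simp)

-- A-loop completeness from a prefix chain
lemma loopA_prefix (length : Int) :
    ∀ (m : Nat) (t : List Int) (prev longest : Int), 1 ≤ m →
    chainL (prev + 1) m <+: t → longest + m = length →
    hsLoopA length t prev longest = true := by
  intro m
  induction m with
  | zero => omega
  | succ m ih =>
    intro t prev longest _ hpre hsum
    obtain ⟨t', rfl⟩ := hpre
    rw [chainL] at *
    simp only [List.cons_append, hsLoopA, if_true]
    by_cases hl : longest + 1 = length
    · rw [if_pos hl]
    · rw [if_neg hl]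
      have hm : 1 ≤ m := by
        rcases Nat.eq_zero_or_pos m with h0 | h1
        · exfalso; apply hl; push_cast at hsum; omega
        · exact h1
      exact ih _ (prev + 1) (longest + 1) hm ⟨t', rfl⟩ (by push_cast at hsum ⊢; omega)

-- A-loop completeness from an infix chain
lemma loopA_infix (length : Int) :
    ∀ (t : List Int) (prev longest a : Int), 1 ≤ longest → longest < length →
    chainL a length.toNat <:+: t →
    hsLoopA length t prev longest = true := by
  intro t
  induction t with
  | nil =>
    intro prev longest a h1 h2 hinf
    exfalso
    have hnil : chainL a length.toNat = [] := List.eq_nil_of_infix_nil hinf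
    have : length.toNat = 0 := by
      cases hL : length.toNat with
      | zero => rfl
      | succ k => rw [hL, chainL] at hnil; cases hnil
    omega
  | cons x rest ih =>
    intro prev longest a h1 h2 hinf
    rcases List.infix_cons_iff.mp hinf with hpre | hinf'
    · -- chain is a prefix of x :: rest, so x = a
      obtain ⟨k, hk⟩ : ∃ k, length.toNat = k + 2 := ⟨length.toNat - 2, by omega⟩
      rw [hk, chainL] at hpre
      obtain ⟨t', ht'⟩ := hpre
      simp only [List.cons_append] at ht'
      have hxa : x = a := (List.cons.injEq .. ▸ ht').1.symm
      have hrest : chainL (a + 1) (k + 1) ++ t' = rest := (List.cons.injEq .. ▸ ht').2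
      subst hxa
      simp only [hsLoopA]
      split_ifs with hx hl
      · rfl
      · refine loopA_prefix length (length - (longest + 1)).toNat rest x (longest + 1)
          (by omega) ?_ (by omega)
        refine List.IsPrefix.trans ?_ ⟨t', hrest⟩
        exact chainL_prefix_mono _ _ (x + 1) (by omega)
      · refine loopA_prefix length (length - 1).toNat rest x 1 (by omega) ?_ (by omega)
        refine List.IsPrefix.trans ?_ ⟨t', hrest⟩
        exact chainL_prefix_mono _ _ (x + 1) (by omega)
    · -- chain is an infix of rest
      simp only [hsLoopA]
      split_ifs with hx hl
      · rfl
      · exact ih x (longest + 1) a (by omega) (by omega) hinf'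
      · exact ih x 1 a le_rfl (by omega) hinf'

-- strictly sorted list: an interval of members is a prefix (when its start is minimal)
lemma chain_prefix_of_sorted :
    ∀ (m : Nat) (a : Int) (l : List Int), l.Pairwise (· < ·) →
    (∀ k : Nat, k < m → a + (k : Int) ∈ l) → (∀ y ∈ l, a ≤ y) →
    chainL a m <+: l := by
  intro m
  induction m with
  | zero => intro a l _ _ _; exact List.nil_prefix
  | succ m ih =>
    intro a l hp hmem hle
    have ha : a ∈ l := by simpa using hmem 0 (by omega)
    cases l with
    | nil => cases ha
    | cons h t =>
      have hht : ∀ y ∈ t, h < y := (List.pairwise_cons.mp hp).1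
      have hah : a = h := by
        rcases List.mem_cons.mp ha with h1 | h1
        · exact h1
        · have := hht a h1
          have := hle h (by simp)
          omega
      subst hah
      rw [chainL]
      refine List.cons_prefix_cons.mpr ⟨rfl, ih (a + 1) t (List.pairwise_cons.mp hp).2 ?_ ?_⟩
      · intro k hk
        have hmem' : a + ((k + 1 : Nat) : Int) ∈ a :: t := hmem (k + 1) (by omega)
        rcases List.mem_cons.mp hmem' with h1 | h1
        · exfalso; push_cast at h1; omega
        · have heq : a + 1 + (k : Int) = a + ((k + 1 : Nat) : Int) := by push_cast; ring
          rw [heq]; exact h1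
      · intro y hy
        have := hht y hy
        omega

-- strictly sorted list: an interval of members is an infix
lemma chain_infix_of_sorted :
    ∀ (l : List Int) (a : Int) (m : Nat), 1 ≤ m → l.Pairwise (· < ·) →
    (∀ k : Nat, k < m → a + (k : Int) ∈ l) →
    chainL a m <:+: l := by
  intro l
  induction l with
  | nil =>
    intro a m hm _ hmem
    exfalso
    have := hmem 0 (by omega)
    simp at this
  | cons h t ih =>
    intro a m hm hp hmem
    by_cases hah : a = h
    · subst hah
      refine (chain_prefix_of_sorted m a (a :: t) hp hmem ?_).isInfix
      intro y hy
      rcases List.mem_cons.mp hy with h1 | h1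
      · omega
      · have := (List.pairwise_cons.mp hp).1 y h1
        omega
    · have hat : a ∈ t := by
        have h0 := hmem 0 (by omega)
        rcases List.mem_cons.mp (by simpa using h0) with h1 | h1
        · exact absurd h1 hah
        · exact h1
      have hha : h < a := (List.pairwise_cons.mp hp).1 a hat
      have hmt : ∀ k : Nat, k < m → a + (k : Int) ∈ t := by
        intro k hk
        rcases List.mem_cons.mp (hmem k hk) with h1 | h1
        · exfalso; omega
        · exact h1
      exact List.infix_cons (ih a m hm (List.pairwise_cons.mp hp).2 hmt)

-- B-expand soundness
lemma expand_sound (s : List Int) (n length : Int) :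
    ∀ (fuel : Nat) (cur : Int), 1 ≤ cur →
    (∀ j : Int, 1 ≤ j → j < cur → n + j ∈ s) →
    hsExpand s n length cur fuel = true →
    2 ≤ length ∧ ∀ j : Int, 1 ≤ j → j < length → n + j ∈ s := by
  intro fuel
  induction fuel with
  | zero => intro cur _ _ h; simp [hsExpand] at h
  | succ fuel ih =>
    intro cur h1 hmem hrun
    simp only [hsExpand] at hrun
    by_cases hin : (n + cur) ∈ s
    · rw [if_pos hin] at hrun
      by_cases hl : cur + 1 = length
      · refine ⟨by omega, ?_⟩
        intro j hj1 hjl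
        by_cases hje : j = cur
        · subst hje; exact hin
        · exact hmem j hj1 (by omega)
      · rw [if_neg hl] at hrun
        refine ih (cur + 1) (by omega) ?_ hrun
        intro j hj1 hjc
        by_cases hje : j = cur
        · subst hje; exact hin
        · exact hmem j hj1 (by omega)
    · rw [if_neg hin] at hrun; cases hrun

-- B-expand completeness
lemma expand_complete (s : List Int) (n length : Int) :
    ∀ (fuel : Nat) (cur : Int), 1 ≤ cur → cur < length →
    (∀ j : Int, 1 ≤ j → j < length → n + j ∈ s) →
    (length - cur).toNat ≤ fuel →
    hsExpand s n length cur fuel = true := by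
  intro fuel
  induction fuel with
  | zero => intro cur h1 h2 _ hf; omega
  | succ fuel ih =>
    intro cur h1 h2 hmem hf
    simp only [hsExpand]
    rw [if_pos (hmem cur h1 h2)]
    by_cases hl : cur + 1 = length
    · rw [if_pos hl]
    · rw [if_neg hl]
      exact ih (cur + 1) (by omega) (by omega) hmem (by omega)

-- in a finite set of ints, the run of consecutive values containing a member has a minimum
lemma run_min (s : List Int) (n0 : Int) (h0 : n0 ∈ s) :
    ∃ n : Int, n ∈ s ∧ (n - 1) ∉ s ∧ n ≤ n0 ∧
      (∀ k : Int, 0 ≤ k → n + k ≤ n0 → n + k ∈ s) := by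
  have hex : ∃ j : Nat, n0 - (j : Int) ∉ s := by
    by_contra hall
    push Not at hall
    have hinj : Function.Injective (fun j : Nat => n0 - (j : Int)) := by
      intro x y h
      simp only at h
      omega
    have := card_le_of_inj s _ hinj (s.length + 1) (fun j _ => hall j)
    omega
  classical
  have hj0 : n0 - ((Nat.find hex : Nat) : Int) ∉ s := Nat.find_spec hex
  have hmin : ∀ i : Nat, i < Nat.find hex → n0 - (i : Int) ∈ s :=
    fun i hi => not_not.mp (Nat.find_min hex hi)
  have hj0pos : 1 ≤ Nat.find hex := by
    rcases Nat.eq_zero_or_pos (Nat.find hex) with h | h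
    · exfalso; apply hj0; rw [h]; simpa using h0
    · exact h
  refine ⟨n0 - ((Nat.find hex : Nat) : Int) + 1, ?_, ?_, by omega, ?_⟩
  · have := hmin (Nat.find hex - 1) (by omega)
    have heq : n0 - ((Nat.find hex - 1 : Nat) : Int) = n0 - ((Nat.find hex : Nat) : Int) + 1 := by
      omega
    rwa [heq] at this
  · have heq : n0 - ((Nat.find hex : Nat) : Int) + 1 - 1 = n0 - ((Nat.find hex : Nat) : Int) := by
      ring
    rw [heq]; exact hj0
  · intro k hk0 hkle
    obtain ⟨kn, rfl⟩ : ∃ kn : Nat, k = (kn : Int) := ⟨k.toNat, by omega⟩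
    have hi : Nat.find hex - 1 - kn < Nat.find hex := by omega
    have hm := hmin (Nat.find hex - 1 - kn) hi
    have heq : n0 - ((Nat.find hex - 1 - kn : Nat) : Int) =
        n0 - ((Nat.find hex : Nat) : Int) + 1 + (kn : Int) := by omega
    rwa [heq] at hm

-- A's result is exactly StraightIn
lemma hsA_iff (dice : List Int) (length : Int) :
    has_straight dice length = true ↔ StraightIn dice length := by
  unfold has_straight
  simp only []
  have hmemod : ∀ x : Int, (x ∈ PySem.List.sorted (PySem.Set.ofList dice) (fun x => x) false ↔ x ∈ dice) := by
    intro x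
    rw [PySem.List.mem_sorted (PySem.Set.ofList dice) (fun x => x) false x]
    exact PySem.Set.mem_ofList dice x
  have hpair : (PySem.List.sorted (PySem.Set.ofList dice) (fun x => x) false).Pairwise (· < ·) :=
    PySem.List.sorted_ofList_pairwise_lt dice
  constructor
  · intro h
    by_cases hg : (dice.length : Int) < length
    · rw [if_pos hg] at h; cases h
    · rw [if_neg hg] at h
      cases hod : PySem.List.sorted (PySem.Set.ofList dice) (fun x => x) false with
      | nil => rw [hod] at h; cases h
      | cons hd tl =>
        rw [hod] at h
        refine loopA_sound dice length tl hd 1 le_rfl ?_ ?_ h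
        · intro j hj0 hj1
          have hj : j = 0 := by omega
          subst hj
          have : hd ∈ dice := (hmemod hd).mp (by rw [hod]; simp)
          simpa using this
        · intro x hx
          exact (hmemod x).mp (by rw [hod]; simp [hx])
  · rintro ⟨h2, n, hints⟩
    have hcard : length.toNat ≤ dice.length := by
      refine card_le_of_inj dice (fun k : Nat => n + (k : Int)) ?_ length.toNat ?_
      · intro x y h
        simp only at h
        omega
      · intro j hj
        exact hints j (by omega) (by omega)
    rw [if_neg (by omega)]
    have hchain : chainL n length.toNat <:+: PySem.List.sorted (PySem.Set.ofList dice) (fun x => x) false := by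
      refine chain_infix_of_sorted _ n length.toNat (by omega) hpair ?_
      intro k hk
      exact (hmemod _).mpr (hints k (by omega) (by omega))
    cases hod : PySem.List.sorted (PySem.Set.ofList dice) (fun x => x) false with
    | nil =>
      exfalso
      rw [hod] at hchain
      have hnil : chainL n length.toNat = [] := List.eq_nil_of_infix_nil hchain
      have : length.toNat = 0 := by
        cases hL : length.toNat with
        | zero => rfl
        | succ k => rw [hL, chainL] at hnil; cases hnil
      omega
    | cons hd tl =>
      rw [hod] at hchain
      rcases List.infix_cons_iff.mp hchain with hpre | hinf
      · obtain ⟨k, hk⟩ : ∃ k, length.toNat = k + 2 := ⟨length.toNat - 2, by omega⟩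
        rw [hk, chainL] at hpre
        obtain ⟨t', ht'⟩ := hpre
        simp only [List.cons_append] at ht'
        have hxa : hd = n := (List.cons.injEq .. ▸ ht').1.symm
        have hrest : chainL (n + 1) (k + 1) ++ t' = tl := (List.cons.injEq .. ▸ ht').2
        subst hxa
        refine loopA_prefix length (length - 1).toNat tl hd 1 (by omega) ?_ (by omega)
        refine List.IsPrefix.trans ?_ ⟨t', hrest⟩
        exact chainL_prefix_mono _ _ (hd + 1) (by omega)
      · exact loopA_infix length tl hd 1 n le_rfl (by omega) hinf

-- B's result is exactly StraightIn
lemma hsB_iff (dice : List Int) (length : Int) :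
    has_straight_alt dice length = true ↔ StraightIn dice length := by
  unfold has_straight_alt
  simp only []
  have hmems : ∀ x : Int, (x ∈ PySem.Set.ofList dice ↔ x ∈ dice) := PySem.Set.mem_ofList dice
  rw [List.any_eq_true]
  constructor
  · rintro ⟨n, hn, hp⟩
    by_cases h1 : (n - 1) ∈ PySem.Set.ofList dice
    · rw [if_pos h1] at hp; cases hp
    · rw [if_neg h1] at hp
      obtain ⟨h2, hmem⟩ :=
        expand_sound (PySem.Set.ofList dice) n length (PySem.Set.ofList dice).length 1 le_rfl
          (by intro j hj1 hj2; omega) hp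
      refine ⟨h2, n, ?_⟩
      intro k hk0 hkl
      by_cases hk : k = 0
      · subst hk; simpa using (hmems n).mp hn
      · exact (hmems _).mp (hmem k (by omega) hkl)
  · rintro ⟨h2, n0, hints⟩
    have hn0 : n0 ∈ PySem.Set.ofList dice := (hmems n0).mpr (by simpa using hints 0 le_rfl (by omega))
    obtain ⟨n, hns, hnm1, hle, hdown⟩ := run_min (PySem.Set.ofList dice) n0 hn0
    refine ⟨n, hns, ?_⟩
    rw [if_neg hnm1]
    have hup : ∀ j : Int, 1 ≤ j → j < length → n + j ∈ PySem.Set.ofList dice := by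
      intro j hj1 hjl
      by_cases hc : n + j ≤ n0
      · exact hdown j (by omega) hc
      · have heq : n + j = n0 + (n + j - n0) := by ring
        rw [heq]
        exact (hmems _).mpr (hints (n + j - n0) (by omega) (by omega))
    have hfuel : length.toNat ≤ (PySem.Set.ofList dice).length := by
      refine card_le_of_inj (PySem.Set.ofList dice) (fun k : Nat => n0 + (k : Int)) ?_ length.toNat ?_
      · intro x y h
        simp only at h
        omega
      · intro j hj
        exact (hmems _).mpr (hints j (by omega) (by omega))
    exact expand_complete (PySem.Set.ofList dice) n length (PySem.Set.ofList dice).length 1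
      le_rfl (by omega) hup (by omega)

-- ===== VERDICT (by name: the statement is the Claim_ definition above) =====
theorem has_straight_spec : Claim_equal_has_straight := by
  intro dice length _
  unfold Spec_has_straight
  rw [Bool.eq_iff_iff, hsA_iff, hsB_iff]
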